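-- pv_equiv track=rewrite | github.com/samliddicott/mcpash | src/mctash/word_parser.py | _scan_single_quote_atom
-- ===== SOURCE A (Python) =====
-- def _scan_single_quote_atom(text: str, start: int) -> int:
--     i = start
--     while i < len(text):
--         ch = text[i]
--         if ch == "'":
--             return i + 1
--         if ch == "\n":
--             return -1
--         i += 1
--     return -1
-- ===== SOURCE B (Python) =====
-- def _scan_single_quote_atom(text: str, start: int) -> int:
--     q = text.find("'", start)
--     if q == -1:
--         return -1
--     n = text.find("\n", start)
--     if n != -1 and n < q:
--         return -1
--     return q + 1
-- ===== Notes on version B (the rewrite author's own statement) =====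
-- stated objective: idiomatic
-- what changed: The hand-rolled per-character while-loop is replaced by two independent str.find library searches (for the quote and for the newline) plus one positional comparison; the scan runs in C instead of Python bytecode.
-- intended difference: For -len(text) <= start < 0 where a quote is found before any newline, A uses Python's negative-index wraparound (scanning the suffix at negative positions, then rescanning the whole string) and returns the meaningless i+1 <= 0 or a prefix-rescan result, while B follows str.find's convention of clamping a negative start to len+start and returns the position after that quote (or -1), which is the intended 'scan from this position' meaning. — e.g. on _scan_single_quote_atom("'a", -2): A returns -1, B returns 1
-- crash fix: For start < -len(text), A raises IndexError (text[i] below the negative-index range); B returns the scan result from the clamped position 0, e.g. -1 on the witness. — e.g. on _scan_single_quote_atom("a", -5): A raises IndexError, B returns -1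
import Mathlib
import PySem

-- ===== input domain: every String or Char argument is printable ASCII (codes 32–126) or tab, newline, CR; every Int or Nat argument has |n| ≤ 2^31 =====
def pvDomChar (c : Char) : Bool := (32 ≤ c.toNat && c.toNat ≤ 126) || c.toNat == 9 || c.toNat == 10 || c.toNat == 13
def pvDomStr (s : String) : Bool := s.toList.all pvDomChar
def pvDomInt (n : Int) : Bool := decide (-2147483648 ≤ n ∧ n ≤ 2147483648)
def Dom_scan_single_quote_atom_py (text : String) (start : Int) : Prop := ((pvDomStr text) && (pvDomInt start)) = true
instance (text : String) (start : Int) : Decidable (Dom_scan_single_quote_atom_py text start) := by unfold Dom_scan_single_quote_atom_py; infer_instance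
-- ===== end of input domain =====

-- B replaces A's hand-rolled character loop by two str.find searches plus a positional
-- comparison (idiomatic); on negative start inside range, A's negative-index wraparound
-- value is replaced by str.find's clamping convention (stated as D_ below).


-- ===== PORT A =====
-- literal port of the while-loop; the `none` branch is Python's IndexError (outside Pre_)
def pyALoop (l : List Char) (i : Int) : Int :=
  if _h : i < (l.length : Int) then
    match PySem.List.pyGet? l i with
    | some ch =>
        if ch = '\'' then i + 1
        else if ch = '\n' then -1
        else pyALoop l (i + 1)
    | none => -1
  else -1
  termination_by ((l.length : Int) - i).toNat
  decreasing_by omega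

def scan_single_quote_atom_py (text : String) (start : Int) : Int :=
  pyALoop text.toList start

-- ===== PORT B =====
def scan_single_quote_atom_py_alt (text : String) (start : Int) : Int :=
  let q := PySem.Str.findFrom text "'" start none
  if q = -1 then -1
  else
    let n := PySem.Str.findFrom text "\n" start none
    if n ≠ -1 ∧ n < q then -1 else q + 1

-- ===== PRECONDITION & SPEC =====
-- Pre_ excludes exactly start < -len(text), where A raises IndexError (see Raises_ below).
def Pre_scan_single_quote_atom_py (text : String) (start : Int) : Prop :=
  -(text.toList.length : Int) ≤ start
instance (text : String) (start : Int) : Decidable (Pre_scan_single_quote_atom_py text start) := by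
  unfold Pre_scan_single_quote_atom_py; infer_instance

def pvWitness_scan_single_quote_atom_py : String × Int := ("ab'c", 0)

-- helpers for D_: does a quote occur strictly before any newline in u? / no quote or newline in u?
def pvQuoteWins (u : List Char) : Bool :=
  match u.findIdx? (· = '\''), u.findIdx? (· = '\n') with
  | some q, some n => decide (q < n)
  | some _, none => true
  | _, _ => false

def pvNoSpecial (u : List Char) : Bool :=
  (u.findIdx? (· = '\'')).isNone && (u.findIdx? (· = '\n')).isNone

-- For -len(text) ≤ start < 0 where a quote wins A's scan (in the suffix text[len+start:],
-- or, if that suffix has no quote/newline, in the whole rescanned text), A's negative-index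
-- wraparound returns the meaningless i+1 ≤ 0 or a prefix-rescan result, while B follows
-- str.find's clamping of a negative start and returns the position after that quote (or -1),
-- the intended 'scan from this position' meaning.
def D_scan_single_quote_atom_py (text : String) (start : Int) : Prop :=
  -(text.toList.length : Int) ≤ start ∧ start < 0 ∧
  (pvQuoteWins (text.toList.drop ((text.toList.length : Int) + start).toNat) = true ∨
   (pvNoSpecial (text.toList.drop ((text.toList.length : Int) + start).toNat) = true ∧
    pvQuoteWins text.toList = true))
instance (text : String) (start : Int) : Decidable (D_scan_single_quote_atom_py text start) := by
  unfold D_scan_single_quote_atom_py; infer_instance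

def Spec_scan_single_quote_atom_py (text : String) (start : Int) (out : Int) : Prop :=
  ¬ D_scan_single_quote_atom_py text start → out = scan_single_quote_atom_py_alt text start
instance (text : String) (start : Int) (out : Int) : Decidable (Spec_scan_single_quote_atom_py text start out) := by
  unfold Spec_scan_single_quote_atom_py; infer_instance

def pvDiffWitness_scan_single_quote_atom_py : String × Int := ("'a", -2)
def pvDiffWitnessOut_scan_single_quote_atom_py : Int × Int := (-1, 1)

-- For start < -len(text), A raises IndexError (text[i] below the negative-index range);
-- B returns the scan result from the clamped position 0.
def Raises_scan_single_quote_atom_py (text : String) (start : Int) : Prop :=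
  start < -(text.toList.length : Int)
instance (text : String) (start : Int) : Decidable (Raises_scan_single_quote_atom_py text start) := by
  unfold Raises_scan_single_quote_atom_py; infer_instance

def pvRaiseWitness_scan_single_quote_atom_py : String × Int := ("a", -5)
def pvRaiseWitnessOut_scan_single_quote_atom_py : Int := -1

-- ===== CLAIM (what is proved, stated in full; the proofs are below) =====
def Claim_unchanged_scan_single_quote_atom_py : Prop := ∀ (text : String) (start : Int), Dom_scan_single_quote_atom_py text start → Pre_scan_single_quote_atom_py text start → Spec_scan_single_quote_atom_py text start (scan_single_quote_atom_py text start)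
def Claim_changed_scan_single_quote_atom_py : Prop := Dom_scan_single_quote_atom_py (pvDiffWitness_scan_single_quote_atom_py.1) (pvDiffWitness_scan_single_quote_atom_py.2) ∧ Pre_scan_single_quote_atom_py (pvDiffWitness_scan_single_quote_atom_py.1) (pvDiffWitness_scan_single_quote_atom_py.2) ∧ D_scan_single_quote_atom_py (pvDiffWitness_scan_single_quote_atom_py.1) (pvDiffWitness_scan_single_quote_atom_py.2) ∧ scan_single_quote_atom_py (pvDiffWitness_scan_single_quote_atom_py.1) (pvDiffWitness_scan_single_quote_atom_py.2) = pvDiffWitnessOut_scan_single_quote_atom_py.1 ∧ scan_single_quote_atom_py_alt (pvDiffWitness_scan_single_quote_atom_py.1) (pvDiffWitness_scan_single_quote_atom_py.2) = pvDiffWitnessOut_scan_single_quote_atom_py.2 ∧ pvDiffWitnessOut_scan_single_quote_atom_py.1 ≠ pvDiffWitnessOut_scan_single_quote_atom_py.2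
def Claim_exact_scan_single_quote_atom_py : Prop := ∀ (text : String) (start : Int), Dom_scan_single_quote_atom_py text start → Pre_scan_single_quote_atom_py text start → D_scan_single_quote_atom_py text start → scan_single_quote_atom_py text start ≠ scan_single_quote_atom_py_alt text start
def Claim_raises_scan_single_quote_atom_py : Prop := (∀ (text : String) (start : Int), Dom_scan_single_quote_atom_py text start → Raises_scan_single_quote_atom_py text start → ¬ Pre_scan_single_quote_atom_py text start) ∧ (Dom_scan_single_quote_atom_py (pvRaiseWitness_scan_single_quote_atom_py.1) (pvRaiseWitness_scan_single_quote_atom_py.2) ∧ Raises_scan_single_quote_atom_py (pvRaiseWitness_scan_single_quote_atom_py.1) (pvRaiseWitness_scan_single_quote_atom_py.2) ∧ scan_single_quote_atom_py_alt (pvRaiseWitness_scan_single_quote_atom_py.1) (pvRaiseWitness_scan_single_quote_atom_py.2) = pvRaiseWitnessOut_scan_single_quote_atom_py)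

-- ===== LEMMAS AND PROOFS =====

-- abstract scanner: some r = the loop returned r, none = ran off the end
def pvScan2 : List Char → Int → Option Int
  | [], _ => none
  | ch :: rest, pos =>
      if ch = '\'' then some (pos + 1)
      else if ch = '\n' then some (-1)
      else pvScan2 rest (pos + 1)

def pvClamp (start : Int) (n : Nat) : Nat :=
  if start < 0 then (start + n).toNat else min start.toNat n

theorem pv_singleton_prefix_iff (c : Char) (u : List Char) : [c] <+: u ↔ u.head? = some c := by
  cases u with
  | nil => simp
  | cons a t => simp [List.cons_prefix_cons, eq_comm]

theorem pv_singleton_infix_iff (c : Char) (u : List Char) : [c] <:+: u ↔ c ∈ u := by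
  constructor
  · intro h; exact h.subset (List.mem_singleton_self c)
  · intro h
    obtain ⟨s, t, rfl⟩ := List.append_of_mem h
    exact ⟨s, t, by simp⟩

theorem pv_prefix_drop_iff (c : Char) (u : List Char) (i : Nat) :
    [c] <+: u.drop i ↔ u[i]? = some c := by
  rw [pv_singleton_prefix_iff, List.head?_drop]

theorem pv_find_single_eq (u : List Char) (c : Char) :
    PySem.Chars.find u [c] =
      match u.findIdx? (· = c) with
      | some j => (j : Int)
      | none => -1 := by
  cases h : u.findIdx? (· = c) with
  | none =>
    have hc : c ∉ u := by
      intro hm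
      have := List.findIdx?_eq_none_iff.mp h c hm
      simp at this
    simpa using (PySem.Chars.find_eq_neg_one_iff u [c]).mpr
      (fun hin => hc ((pv_singleton_infix_iff c u).mp hin))
  | some j =>
    obtain ⟨hjlt, hj, hjmin⟩ := List.findIdx?_eq_some_iff_getElem.mp h
    have hmem : c ∈ u := by
      have : u[j] = c := by simpa using hj
      exact this ▸ u.getElem_mem hjlt
    have h0 : 0 ≤ PySem.Chars.find u [c] :=
      (PySem.Chars.find_nonneg_iff u [c]).mpr ((pv_singleton_infix_iff c u).mpr hmem)
    obtain ⟨hpre, hmin⟩ := PySem.Chars.find_spec h0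
    have hfc : u[(PySem.Chars.find u [c]).toNat]? = some c := (pv_prefix_drop_iff _ _ _).mp hpre
    have hflt : (PySem.Chars.find u [c]).toNat < u.length := by
      by_contra hge
      rw [List.getElem?_eq_none (by omega)] at hfc
      simp at hfc
    -- find.toNat = j by double minimality
    have h1 : ¬ j < (PySem.Chars.find u [c]).toNat := by
      intro hlt
      exact hmin j hlt ((pv_prefix_drop_iff c u j).mpr (by rw [List.getElem?_eq_getElem hjlt]; simpa using hj))
    have h2 : ¬ (PySem.Chars.find u [c]).toNat < j := by
      intro hlt
      have : u[(PySem.Chars.find u [c]).toNat] = c := by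
        have := hfc; rwa [List.getElem?_eq_getElem hflt, Option.some_inj] at this
      exact hjmin _ hlt (by simp [this])
    have : (PySem.Chars.find u [c]).toNat = j := by omega
    simp only []
    omega

theorem pv_findFrom_single (l : List Char) (c : Char) (start : Int) :
    PySem.Chars.findFrom l [c] start none =
      match (l.drop (pvClamp start l.length)).findIdx? (· = c) with
      | some j => ((pvClamp start l.length : Int) + j : Int)
      | none => -1 := by
  simp only [PySem.Chars.findFrom, pvClamp]
  by_cases hneg : start < 0
  · have hst : ¬ ((l.length : Int) < (if start + (l.length : Int) < 0 then 0 else start + (l.length : Int))) := by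
      split <;> omega
    simp only [hneg, if_true, hst, if_false, Int.toNat_natCast, List.take_length]
    have : (if start + (l.length : Int) < 0 then (0:Int) else start + (l.length : Int)).toNat
        = (start + (l.length : Int)).toNat := by split <;> omega
    rw [this, pv_find_single_eq]
    cases hfi : (l.drop (start + (l.length:Int)).toNat).findIdx? (· = c) with
    | none => simp
    | some j => simp; omega
  · simp only [hneg, if_false, Int.toNat_natCast, List.take_length]
    by_cases hlt : (l.length : Int) < start
    · have hmin : min start.toNat l.length = l.length := by omega
      simp only [hlt, if_true, hmin, List.drop_length, List.findIdx?_nil]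
    · have hmin : min start.toNat l.length = start.toNat := by omega
      simp only [hlt, if_false, hmin]
      rw [pv_find_single_eq]
      cases hfi : (l.drop start.toNat).findIdx? (· = c) with
      | none => simp
      | some j => simp; omega

theorem pv_idx_ne (u : List Char) (q n : Nat)
    (hq : u.findIdx? (· = '\'') = some q) (hn : u.findIdx? (· = '\n') = some n) : q ≠ n := by
  obtain ⟨hq1, hq2, _⟩ := List.findIdx?_eq_some_iff_getElem.mp hq
  obtain ⟨hn1, hn2, _⟩ := List.findIdx?_eq_some_iff_getElem.mp hn
  intro hqn
  subst hqn
  simp at hq2 hn2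
  rw [hq2] at hn2
  exact absurd hn2 (by decide)

theorem pv_idx_lt (u : List Char) (q : Nat) (p : Char → Bool)
    (hq : u.findIdx? p = some q) : q < u.length :=
  (List.findIdx?_eq_some_iff_getElem.mp hq).1

theorem pv_scan2_key (u : List Char) : ∀ pos : Int,
    pvScan2 u pos =
      match u.findIdx? (· = '\''), u.findIdx? (· = '\n') with
      | none, none => none
      | some q, none => some (pos + q + 1)
      | none, some _ => some (-1)
      | some q, some n => if q < n then some (pos + q + 1) else some (-1) := by
  induction u with
  | nil => intro pos; simp [pvScan2]
  | cons ch rest ih =>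
    intro pos
    by_cases hq : ch = '\''
    · subst hq
      cases hn : rest.findIdx? (· = '\n') <;>
        simp [pvScan2, List.findIdx?_cons, hn]
    · by_cases hn : ch = '\n'
      · subst hn
        cases hq2 : rest.findIdx? (· = '\'') <;>
          simp [pvScan2, List.findIdx?_cons, hq2]
      · rw [show pvScan2 (ch :: rest) pos = pvScan2 rest (pos + 1) by simp [pvScan2, hq, hn]]
        rw [ih (pos + 1)]
        simp only [List.findIdx?_cons,
          show (decide (ch = '\'')) = false by simpa using hq,
          show (decide (ch = '\n')) = false by simpa using hn,
          Bool.false_eq_true, if_false]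
        cases hq2 : rest.findIdx? (· = '\'') with
        | none =>
          cases hn2 : rest.findIdx? (· = '\n') <;> simp
        | some q =>
          cases hn2 : rest.findIdx? (· = '\n') with
          | none => simp; omega
          | some n =>
            simp only [Option.map_some]
            by_cases hlt : q < n
            · rw [if_pos hlt, if_pos (by omega)]; congr 1; push_cast; ring
            · rw [if_neg hlt, if_neg (by omega)]

theorem pv_loop_pos (l : List Char) : ∀ i : Int, 0 ≤ i →
    pyALoop l i = (pvScan2 (l.drop i.toNat) i).getD (-1) := by
  intro i
  fun_induction pyALoop l i with
  | case1 i h hget =>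
    intro h0
    have hlt : i.toNat < l.length := by omega
    have hsome : l[i.toNat]? = some '\'' := by
      rw [← PySem.List.pyGet?_of_nonneg l h0]; exact hget
    have hchar : l[i.toNat] = '\'' := by
      rwa [List.getElem?_eq_getElem hlt, Option.some_inj] at hsome
    rw [List.drop_eq_getElem_cons hlt, hchar]
    simp [pvScan2]
  | case2 i h hget hne =>
    intro h0
    have hlt : i.toNat < l.length := by omega
    have hsome : l[i.toNat]? = some '\n' := by
      rw [← PySem.List.pyGet?_of_nonneg l h0]; exact hget
    have hchar : l[i.toNat] = '\n' := by
      rwa [List.getElem?_eq_getElem hlt, Option.some_inj] at hsome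
    rw [List.drop_eq_getElem_cons hlt, hchar]
    simp [pvScan2]
  | case3 i h ch hget hq hn ih =>
    intro h0
    have hlt : i.toNat < l.length := by omega
    have hsome : l[i.toNat]? = some ch := by
      rw [← PySem.List.pyGet?_of_nonneg l h0]; exact hget
    have hchar : l[i.toNat] = ch := by
      rwa [List.getElem?_eq_getElem hlt, Option.some_inj] at hsome
    rw [List.drop_eq_getElem_cons hlt, hchar]
    rw [show pvScan2 (ch :: l.drop (i.toNat + 1)) i = pvScan2 (l.drop (i.toNat + 1)) (i + 1) by
      simp [pvScan2, hq, hn]]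
    rw [show i.toNat + 1 = (i + 1).toNat by omega]
    exact ih (by omega)
  | case4 i h hget =>
    intro h0
    rw [PySem.List.pyGet?_of_nonneg l h0] at hget
    have hlt : i.toNat < l.length := by omega
    rw [List.getElem?_eq_getElem hlt] at hget
    simp at hget
  | case5 i h =>
    intro h0
    rw [List.drop_eq_nil_iff.mpr (by omega)]
    simp [pvScan2]

theorem pv_loop_neg (l : List Char) : ∀ k : Nat, 1 ≤ k → k ≤ l.length →
    pyALoop l (-(k : Int)) = (pvScan2 (l.drop (l.length - k)) (-(k : Int))).getD (pyALoop l 0) := by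
  intro k
  induction k with
  | zero => omega
  | succ k ih =>
    intro _ hle
    have hlt : l.length - (k + 1) < l.length := by omega
    have hget : PySem.List.pyGet? l (-((k + 1 : Nat) : Int)) = l[l.length - (k + 1)]? :=
      PySem.List.pyGet?_neg_natCast l (k + 1) (by omega) hle
    have hgetE : PySem.List.pyGet? l (-((k + 1 : Nat) : Int)) = some (l[l.length - (k + 1)]) := by
      rw [hget, List.getElem?_eq_getElem hlt]
    have hcond : (-((k + 1 : Nat) : Int)) < (l.length : Int) := by push_cast; omega
    rw [List.drop_eq_getElem_cons hlt]
    rw [pyALoop]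
    rw [dif_pos hcond, hgetE]
    set c := l[l.length - (k + 1)] with hc
    by_cases hq : c = '\''
    · simp [pvScan2, hq]
    · by_cases hn : c = '\n'
      · simp [pvScan2, hn]
      · simp only [hq, hn, if_false]
        rw [show pvScan2 (c :: l.drop (l.length - (k + 1) + 1)) (-((k + 1 : Nat) : Int))
              = pvScan2 (l.drop (l.length - (k + 1) + 1)) (-((k + 1 : Nat) : Int) + 1) by
          simp [pvScan2, hq, hn]]
        by_cases hk : k = 0
        · subst hk
          rw [show (-((0 + 1 : Nat) : Int) + 1) = 0 by norm_num]
          rw [show l.length - (0 + 1) + 1 = l.length by omega]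
          simp [pvScan2, List.drop_length]
        · rw [show (-((k + 1 : Nat) : Int) + 1) = -((k : Nat) : Int) by push_cast; ring]
          rw [show l.length - (k + 1) + 1 = l.length - k by omega]
          exact ih (by omega) (by omega)

-- B's port expressed through the two findIdx? searches on the clamped suffix
theorem pv_alt_eq (text : String) (start : Int) :
    scan_single_quote_atom_py_alt text start =
      (match (text.toList.drop (pvClamp start text.toList.length)).findIdx? (· = '\''),
             (text.toList.drop (pvClamp start text.toList.length)).findIdx? (· = '\n') with
       | none, _ => -1
       | some q, none => ((pvClamp start text.toList.length : Int) + q + 1 : Int)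
       | some q, some n =>
         if n < q then -1 else ((pvClamp start text.toList.length : Int) + q + 1 : Int)) := by
  unfold scan_single_quote_atom_py_alt
  rw [PySem.Str.findFrom_eq, PySem.Str.findFrom_eq]
  rw [show ("'" : String).toList = ['\''] from rfl, show ("\n" : String).toList = ['\n'] from rfl]
  rw [pv_findFrom_single, pv_findFrom_single]
  set K := pvClamp start text.toList.length with hK
  cases hq : (text.toList.drop K).findIdx? (· = '\'') with
  | none => simp
  | some q =>
    rw [if_neg (show ¬((K : Int) + (q : Int) = -1) by omega)]
    cases hn : (text.toList.drop K).findIdx? (· = '\n') with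
    | none => simp
    | some n =>
      by_cases hlt : n < q
      · rw [if_pos (show ((K : Int) + (n : Int) ≠ -1 ∧ (K : Int) + (n : Int) < (K : Int) + (q : Int))
            from ⟨by omega, by omega⟩)]
        simp [hlt]
      · rw [if_neg (show ¬((K : Int) + (n : Int) ≠ -1 ∧ (K : Int) + (n : Int) < (K : Int) + (q : Int))
            by intro h; exact absurd (h.2) (by omega))]
        simp [hlt]

-- ===== VERDICT (by name: the statement is the Claim_ definition above) =====
theorem scan_single_quote_atom_py_spec : Claim_unchanged_scan_single_quote_atom_py := by
  intro text start _ hpre hnd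
  unfold Pre_scan_single_quote_atom_py at hpre
  rw [pv_alt_eq]
  show pyALoop text.toList start = _
  by_cases h0 : 0 ≤ start
  · by_cases hbig : (text.toList.length : Int) ≤ start
    · have hK : pvClamp start text.toList.length = text.toList.length := by
        unfold pvClamp; split <;> omega
      rw [pv_loop_pos text.toList start h0]
      rw [List.drop_eq_nil_iff.mpr (by omega), hK, List.drop_length]
      simp [pvScan2]
    · have hK : pvClamp start text.toList.length = start.toNat := by
        unfold pvClamp; split <;> omega
      rw [pv_loop_pos text.toList start h0, pv_scan2_key, hK]
      cases hq : (text.toList.drop start.toNat).findIdx? (· = '\'') with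
      | none =>
        cases hn : (text.toList.drop start.toNat).findIdx? (· = '\n') <;> simp
      | some q =>
        cases hn : (text.toList.drop start.toNat).findIdx? (· = '\n') with
        | none => simp; omega
        | some n =>
          have hne := pv_idx_ne _ q n hq hn
          by_cases hlt : q < n
          · simp [hlt, show ¬ n < q by omega]; omega
          · simp [hlt, show n < q by omega]
  · obtain ⟨k, hk⟩ : ∃ k : Nat, start = -(k : Int) := ⟨(-start).toNat, by omega⟩
    subst hk
    have hkle : k ≤ text.toList.length := by omega
    have hk1 : 1 ≤ k := by omega
    have hK : pvClamp (-(k : Int)) text.toList.length = text.toList.length - k := by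
      unfold pvClamp; split <;> omega
    rw [pv_loop_neg text.toList k hk1 hkle, pv_loop_pos text.toList 0 le_rfl]
    rw [show Int.toNat 0 = 0 from rfl, List.drop_zero, hK]
    rw [pv_scan2_key, pv_scan2_key]
    unfold D_scan_single_quote_atom_py at hnd
    rw [show ((text.toList.length : Int) + -(k : Int)).toNat = text.toList.length - k by omega] at hnd
    have hnd' : ¬(pvQuoteWins (text.toList.drop (text.toList.length - k)) = true ∨
        (pvNoSpecial (text.toList.drop (text.toList.length - k)) = true ∧
         pvQuoteWins text.toList = true)) := fun h => hnd ⟨by omega, by omega, h⟩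
    cases hq : (text.toList.drop (text.toList.length - k)).findIdx? (· = '\'') with
    | none =>
      cases hn : (text.toList.drop (text.toList.length - k)).findIdx? (· = '\n') with
      | some n => simp
      | none =>
        cases hq2 : text.toList.findIdx? (· = '\'') with
        | none =>
          cases hn2 : text.toList.findIdx? (· = '\n') <;> simp
        | some q2 =>
          cases hn2 : text.toList.findIdx? (· = '\n') with
          | none =>
            exact absurd (Or.inr ⟨by unfold pvNoSpecial; rw [hq, hn]; rfl, by unfold pvQuoteWins; rw [hq2, hn2]⟩) hnd'
          | some n2 =>
            have hne2 := pv_idx_ne _ q2 n2 hq2 hn2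
            by_cases hlt2 : q2 < n2
            · exact absurd (Or.inr ⟨by unfold pvNoSpecial; rw [hq, hn]; rfl,
                by unfold pvQuoteWins; rw [hq2, hn2]; simpa using hlt2⟩) hnd'
            · simp [hlt2]
    | some q =>
      cases hn : (text.toList.drop (text.toList.length - k)).findIdx? (· = '\n') with
      | none =>
        exact absurd (Or.inl (by unfold pvQuoteWins; rw [hq, hn])) hnd'
      | some n =>
        have hne := pv_idx_ne _ q n hq hn
        by_cases hlt : q < n
        · exact absurd (Or.inl (by unfold pvQuoteWins; rw [hq, hn]; simpa using hlt)) hnd'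
        · simp [hlt, show n < q by omega]

theorem scan_single_quote_atom_py_changed : Claim_changed_scan_single_quote_atom_py := by
  unfold Claim_changed_scan_single_quote_atom_py
  refine ⟨by decide, by decide, by decide, ?_, by decide, by decide⟩
  show pyALoop "'a".toList (-2) = -1
  rw [pyALoop.eq_def]
  rw [dif_pos (by decide), show PySem.List.pyGet? "'a".toList (-2) = some '\'' from by decide]
  norm_num

theorem scan_single_quote_atom_py_tight : Claim_exact_scan_single_quote_atom_py := by
  intro text start _ hpre hD
  unfold Pre_scan_single_quote_atom_py at hpre
  unfold D_scan_single_quote_atom_py at hD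
  obtain ⟨_, hneg, hdisj⟩ := hD
  rw [pv_alt_eq]
  show pyALoop text.toList start ≠ _
  obtain ⟨k, hk⟩ : ∃ k : Nat, start = -(k : Int) := ⟨(-start).toNat, by omega⟩
  subst hk
  have hkle : k ≤ text.toList.length := by omega
  have hk1 : 1 ≤ k := by omega
  have hK : pvClamp (-(k : Int)) text.toList.length = text.toList.length - k := by
    unfold pvClamp; split <;> omega
  rw [pv_loop_neg text.toList k hk1 hkle, pv_loop_pos text.toList 0 le_rfl]
  rw [show Int.toNat 0 = 0 from rfl, List.drop_zero, hK]
  rw [pv_scan2_key, pv_scan2_key]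
  rw [show ((text.toList.length : Int) + -(k : Int)).toNat = text.toList.length - k by omega] at hdisj
  have hulen : (text.toList.drop (text.toList.length - k)).length = k := by
    rw [List.length_drop]; omega
  cases hq : (text.toList.drop (text.toList.length - k)).findIdx? (· = '\'') with
  | some q =>
    have hqlt : q < k := by
      have := pv_idx_lt _ q _ hq; omega
    cases hn : (text.toList.drop (text.toList.length - k)).findIdx? (· = '\n') with
    | none => simp; omega
    | some n =>
      have hqw : pvQuoteWins (text.toList.drop (text.toList.length - k)) = true := by
        rcases hdisj with h | ⟨h, _⟩
        · exact h
        · unfold pvNoSpecial at h; rw [hq] at h; simp at h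
      have hlt : q < n := by
        unfold pvQuoteWins at hqw; rw [hq, hn] at hqw; simpa using hqw
      simp [hlt, show ¬ n < q by omega]; omega
  | none =>
    have hns : pvNoSpecial (text.toList.drop (text.toList.length - k)) = true ∧
        pvQuoteWins text.toList = true := by
      rcases hdisj with h | h
      · unfold pvQuoteWins at h; rw [hq] at h
        cases hnx : (text.toList.drop (text.toList.length - k)).findIdx? (· = '\n') <;>
          rw [hnx] at h <;> simp at h
      · exact h
    obtain ⟨hns1, hqwl⟩ := hns
    have hn : (text.toList.drop (text.toList.length - k)).findIdx? (· = '\n') = none := by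
      unfold pvNoSpecial at hns1; rw [hq] at hns1
      simpa [Option.isNone_iff_eq_none] using hns1
    rw [hn]
    cases hq2 : text.toList.findIdx? (· = '\'') with
    | none =>
      unfold pvQuoteWins at hqwl; rw [hq2] at hqwl
      cases hnx : text.toList.findIdx? (· = '\n') <;> rw [hnx] at hqwl <;> simp at hqwl
    | some q2 =>
      cases hn2 : text.toList.findIdx? (· = '\n') with
      | none => simp; omega
      | some n2 =>
        have hlt2 : q2 < n2 := by
          unfold pvQuoteWins at hqwl; rw [hq2, hn2] at hqwl; simpa using hqwl
        simp [hlt2]; omega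

@[simp]
theorem scan_single_quote_atom_py_raises : Claim_raises_scan_single_quote_atom_py := by
  unfold Claim_raises_scan_single_quote_atom_py
  constructor
  · intro text start _ hr hp
    unfold Raises_scan_single_quote_atom_py at hr
    unfold Pre_scan_single_quote_atom_py at hp
    omega
  · exact ⟨by decide, by decide, by decide⟩
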